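-- pv_equiv track=rewrite | github.com/birukbelay/dsa-questions | interviews/new.py | count
-- ===== SOURCE A (Python) =====
-- def count(emails, urls):
--     """ Approach
--     1. Find the domain names with from the urls without the www. prefix
--     2. iterate over the emails for each url and check whether the email contains that domain name
--     3. create a dictionary and collect the count of each emails repetition
--
--     """
--     # d={}
--     # # iterate over each url
--     # for i in urls:
--     #     # get the url with out the www. prefix
--     #     val = i.removeprefix("www.")
--     #     # iterate over the emails to check if they contain the domain
--     #     for email in emails:
--     #         # check if the email contains the string and and update the dictionary value
--     #         if val in email:
--     #             d[i] +=1
--     # return d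
--
--     """ changed aproach 2
--     1. iterate over the email addresses
--     2. get the domain name from each  email address so that we dont have to iterate over the urls
--
--     """
--     urlDomains= {}
--     for i in urls:
--         val = i.removeprefix("www.")
--         urlDomains[val] = urlDomains.get(val, 0) +1
--
--     d={}
--     for email in emails:
--         s = email.split("@")
--
--         url = s[1]
--         if url in urlDomains:
--             domain = "www."+url
--             d[domain] = d.get(domain, 0) +1
--     return d
-- ===== SOURCE B (Python) =====
-- def count(emails, urls):
--     allowed = {u.removeprefix("www.") for u in urls}
--     doms = [e.split("@")[1] for e in emails]
--
--     def go(ds):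
--         # recursive partition: peel the first domain, strip ALL of its
--         # occurrences from the tail, and get its count as a length difference
--         if not ds:
--             return []
--         d = ds[0]
--         rest = [x for x in ds[1:] if x != d]
--         entry = [("www." + d, len(ds) - len(rest))] if d in allowed else []
--         return entry + go(rest)
--
--     return dict(go(doms))
-- ===== Notes on version B (the rewrite author's own statement) =====
-- stated objective: alternative
-- what changed: B replaces A's single-pass incremental counter dict with a recursive partition: it peels the first email domain, removes every occurrence of it from the tail, obtains its count as a length difference, and recurses on the shrunken list, finally wrapping the produced pairs in dict().
import Mathlib
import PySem

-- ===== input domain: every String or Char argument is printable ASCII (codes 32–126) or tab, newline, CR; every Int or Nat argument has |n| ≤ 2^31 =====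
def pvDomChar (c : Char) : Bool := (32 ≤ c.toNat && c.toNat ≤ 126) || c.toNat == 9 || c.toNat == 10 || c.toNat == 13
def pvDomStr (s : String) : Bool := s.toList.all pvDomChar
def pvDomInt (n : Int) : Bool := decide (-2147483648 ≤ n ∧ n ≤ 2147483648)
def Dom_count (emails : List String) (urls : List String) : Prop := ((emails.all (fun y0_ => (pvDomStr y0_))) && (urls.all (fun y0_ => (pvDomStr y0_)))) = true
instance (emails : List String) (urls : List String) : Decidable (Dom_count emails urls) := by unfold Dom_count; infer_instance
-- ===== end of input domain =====

-- B replaces A's one-pass counter dict with a recursive partition: peel the first email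
-- domain, strip all its occurrences from the tail, and read its count off as a length
-- difference (objective: alternative decomposition, not faster). Return-value equivalence.

-- exact port of Python's u.removeprefix("www.") (used verbatim by both sources)
def stripWWW (u : String) : String :=
  if PySem.Str.startswith u "www." then PySem.Str.slice u (some 4) none else u

-- exact port of Python's "www." + u
def addWWW (u : String) : String := String.ofList ('w' :: 'w' :: 'w' :: '.' :: u.toList)

-- ===== PORT A =====
def count (emails : List String) (urls : List String) : List (String × Int) :=
  let urlDomains : PySem.Dict String Int := urls.foldl (fun d i =>
    let val := stripWWW i
    d.insert val (d.getD val 0 + 1)) PySem.Dict.empty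
  let d : PySem.Dict String Int := emails.foldl (fun d email =>
    let s := (PySem.Str.split? email "@").getD []   -- sep is the nonempty literal "@", so split? is always some
    match PySem.List.pyGet? s 1 with
    | none => d   -- Python raises IndexError here; such inputs are outside Pre_count
    | some url =>
      if urlDomains.contains url then
        let domain := addWWW url
        d.insert domain (d.getD domain 0 + 1)
      else d) PySem.Dict.empty
  d.items

-- ===== PORT B =====
-- port of Source B's inner recursive 'go': entry for the head domain (count = length difference),
-- then recurse on the tail with every occurrence of that domain removed
def goCount (allowed : PySem.Set String) : List String → List (String × Int)
  | [] => []
  | d :: rest =>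
    let rest' := rest.filter (fun x => x != d)
    (if PySem.Set.contains allowed d then
       [(addWWW d, ((d :: rest).length : Int) - (rest'.length : Int))]
     else []) ++ goCount allowed rest'
  termination_by ds => ds.length
  decreasing_by simpa using Nat.lt_succ_of_le (List.length_filter_le _ _)

def count_alt (emails : List String) (urls : List String) : List (String × Int) :=
  let allowed : PySem.Set String := PySem.Set.ofList (urls.map stripWWW)
  let doms := emails.map (fun e => (PySem.List.pyGet? ((PySem.Str.split? e "@").getD []) 1).getD "")
  -- dict(go(doms)): insert the produced pairs in order
  ((goCount allowed doms).foldl (fun d p => d.insert p.1 p.2) PySem.Dict.empty).items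

-- ===== PRECONDITION & SPEC =====
-- Pre_count: every email contains '@' (split yields at least 2 pieces); otherwise Python A (and B) raise IndexError.
def Pre_count (emails : List String) (urls : List String) : Prop :=
  ∀ e ∈ emails, 2 ≤ ((PySem.Str.split? e "@").getD []).length
instance (emails : List String) (urls : List String) : Decidable (Pre_count emails urls) := by
  unfold Pre_count; infer_instance

def pvWitness_count : List String × List String := (["a@b.com", "c@b.com"], ["www.b.com"])

def Spec_count (emails : List String) (urls : List String) (out : List (String × Int)) : Prop := out = count_alt emails urls
instance (emails : List String) (urls : List String) (out : List (String × Int)) : Decidable (Spec_count emails urls out) := by unfold Spec_count; infer_instance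

-- ===== CLAIM (what is proved, stated in full; the proofs are below) =====
def Claim_equal_count : Prop := ∀ (emails : List String) (urls : List String), Dom_count emails urls → Pre_count emails urls → Spec_count emails urls (count emails urls)

-- ===== LEMMAS AND PROOFS =====

theorem addWWW_inj : Function.Injective addWWW := by
  intro a b h
  simpa [addWWW, ← String.toList_inj, String.toList_ofList] using congrArg String.toList h

theorem pyGet?_one {α : Type} (l : List α) (h : 2 ≤ l.length) :
    PySem.List.pyGet? l 1 = some (l[1]'h) := by
  have h1 : (1 : Int) < (l.length : Int) := by exact_mod_cast h
  simp [PySem.List.pyGet?, PySem.List.pyIdx?, h1]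

theorem ofList_map_inj {α β : Type} [BEq α] [LawfulBEq α] [BEq β] [LawfulBEq β]
    (f : α → β) (hf : Function.Injective f) (l : List α) :
    PySem.Set.ofList (l.map f) = (PySem.Set.ofList l).map f := by
  induction l using List.reverseRecOn with
  | nil => rfl
  | append_singleton xs x ih =>
    rw [List.map_append, List.map_singleton, PySem.Set.ofList_append_singleton,
        PySem.Set.ofList_append_singleton, PySem.Set.add_eq_ite, PySem.Set.add_eq_ite, ih]
    by_cases hx : x ∈ PySem.Set.ofList xs
    · simp [hx, List.mem_map_of_injective hf]
    · simp [hx, List.mem_map_of_injective hf]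

theorem ofList_filter {α : Type} [BEq α] [LawfulBEq α] (p : α → Bool) (l : List α) :
    PySem.Set.ofList (l.filter p) = (PySem.Set.ofList l).filter p := by
  induction l using List.reverseRecOn with
  | nil => rfl
  | append_singleton xs x ih =>
    by_cases hx : x ∈ PySem.Set.ofList xs <;> by_cases hp : p x = true <;>
      simp [hp, hx, List.filter_append,
            PySem.Set.ofList_append_singleton, ih, List.mem_filter]

-- first-occurrence dedup peels its head: ofList (d :: l) = d :: ofList (l with d removed)
theorem ofList_cons_filter {α : Type} [BEq α] [LawfulBEq α] (d : α) (l : List α) :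
    PySem.Set.ofList (d :: l) = d :: PySem.Set.ofList (l.filter (fun x => x != d)) := by
  rw [PySem.Set.ofList_cons, ofList_filter]; rfl

theorem count_add_length_filter {α : Type} [BEq α] [LawfulBEq α] (d : α) (l : List α) :
    l.count d + (l.filter (fun x => x != d)).length = l.length := by
  induction l with
  | nil => rfl
  | cons a l ih =>
    by_cases h : a = d <;> simp [h] <;> omega

-- characterisation of B's recursion: it returns exactly the deduped, allowed-filtered
-- domains with their total counts
theorem goCount_eq_aux (allowed : PySem.Set String) (n : Nat) :
    ∀ ds : List String, ds.length ≤ n →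
      goCount allowed ds =
        ((PySem.Set.ofList ds).filter (fun x => PySem.Set.contains allowed x)).map
          (fun x => (addWWW x, (ds.count x : Int))) := by
  induction n with
  | zero =>
    intro ds h
    have : ds = [] := List.eq_nil_of_length_eq_zero (Nat.le_zero.1 h)
    subst this; rw [goCount]; rfl
  | succ n ih =>
    intro ds h
    cases ds with
    | nil => rw [goCount]; rfl
    | cons d rest =>
      have hlen : (rest.filter (fun x => x != d)).length ≤ n :=
        le_trans (List.length_filter_le _ _) (Nat.succ_le_succ_iff.1 h)
      rw [goCount, ih _ hlen, ofList_cons_filter]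
      have hcnt : ((d :: rest).length : Int) - ((rest.filter (fun x => x != d)).length : Int)
          = ((d :: rest).count d : Int) := by
        have := count_add_length_filter d rest
        simp only [List.count_cons_self, List.length_cons]
        push_cast
        omega
      have hmem : ∀ x ∈ (PySem.Set.ofList (rest.filter (fun x => x != d))).filter
          (fun x => PySem.Set.contains allowed x),
          (rest.filter (fun x => x != d)).count x = (d :: rest).count x := by
        intro x hx
        have hx' : x ∈ rest.filter (fun x => x != d) :=
          (PySem.Set.mem_ofList _ _).1 (List.mem_filter.1 hx).1
        have hne : x ≠ d := by
          have := (List.mem_filter.1 hx').2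
          simpa using this
        rw [List.count_filter (by simpa using hne)]
        simp [Ne.symm hne]
      by_cases hd : PySem.Set.contains allowed d
      · simp only [hd, if_true, List.filter_cons_of_pos hd, List.map_cons, hcnt,
          List.singleton_append]
        congr 1
        exact (List.map_congr_left (fun x hx => by rw [hmem x hx]))
      · rw [if_neg hd, List.filter_cons_of_neg (by simpa using hd), List.nil_append]
        exact List.map_congr_left (fun x hx => by rw [hmem x hx])

-- characterisation of B's recursion: it returns exactly the deduped, allowed-filtered
-- domains with their total counts
theorem goCount_eq (allowed : PySem.Set String) (ds : List String) :
    goCount allowed ds =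
      ((PySem.Set.ofList ds).filter (fun x => PySem.Set.contains allowed x)).map
        (fun x => (addWWW x, (ds.count x : Int))) :=
  goCount_eq_aux allowed ds.length ds le_rfl

-- ===== VERDICT (by name: the statement is the Claim_ definition above) =====
theorem count_spec : Claim_equal_count := by
  intro emails urls _ hpre
  unfold Spec_count count count_alt
  simp only []
  set domF : String → String :=
    fun e => (PySem.List.pyGet? ((PySem.Str.split? e "@").getD []) 1).getD "" with hdomF
  set domains : List String := emails.map domF with hdomains
  set uD : PySem.Dict String Int := urls.foldl (fun d i =>
    d.insert (stripWWW i) (d.getD (stripWWW i) 0 + 1)) PySem.Dict.empty with huD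
  set uS : PySem.Set String := PySem.Set.ofList (urls.map stripWWW) with huS
  -- B's side: the recursion computes the dedup/filter/count table, whose keys are fresh
  have hkeysnd : (((PySem.Set.ofList domains).filter
      (fun x => PySem.Set.contains uS x)).map addWWW).Nodup :=
    (((PySem.Set.nodup_ofList domains).filter _).map addWWW_inj)
  have hB : ((goCount uS domains).foldl (fun d p => d.insert p.1 p.2)
      (PySem.Dict.empty : PySem.Dict String Int)).items
      = ((PySem.Set.ofList domains).filter (fun x => PySem.Set.contains uS x)).map
          (fun x => (addWWW x, (domains.count x : Int))) := by
    rw [goCount_eq, PySem.Dict.items_foldl_insert_fresh _ Prod.fst Prod.snd _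
          (fun a _ => PySem.Dict.contains_empty _)
          (by simpa [List.map_map, Function.comp] using hkeysnd)]
    simp [show (PySem.Dict.empty : PySem.Dict String Int).items = [] from rfl]
  rw [hB]
  -- A's membership test agrees with B's
  have htest : ∀ u, uD.contains u = PySem.Set.contains uS u := by
    intro u
    have hk : uD.keys = uS := by
      rw [huD, PySem.Dict.keys_foldl_insert_key urls stripWWW
            (fun d i => d.getD (stripWWW i) 0 + 1) PySem.Dict.empty,
          PySem.Dict.keys_empty, PySem.Set.update_nil_left, huS]
    rw [PySem.Dict.contains_eq_decide_mem_keys, hk]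
    by_cases hu : u ∈ uS <;> simp [hu, PySem.Set.contains_eq_listContains]
  -- rewrite A's email loop as a loop over the list of domains
  have hbody : emails.foldl (fun d email =>
      match PySem.List.pyGet? ((PySem.Str.split? email "@").getD []) 1 with
      | none => d
      | some url =>
        if uD.contains url then
          d.insert (addWWW url) (d.getD (addWWW url) 0 + 1)
        else d) (PySem.Dict.empty : PySem.Dict String Int)
      = domains.foldl (fun d x =>
          if uD.contains x then d.insert (addWWW x) (d.getD (addWWW x) 0 + 1) else d)
          (PySem.Dict.empty : PySem.Dict String Int) := by
    rw [hdomains, List.foldl_map]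
    apply PySem.List.foldl_congr_mem
    intro acc e he
    have h := pyGet?_one _ (hpre e he)
    simp only [hdomF, h, Option.getD_some]
  rw [hbody, PySem.List.foldl_if_eq_foldl_filter,
      ← List.foldl_map (f := addWWW)
        (g := fun d y => PySem.Dict.insert d y (d.getD y 0 + 1)),
      PySem.Dict.foldl_insert_getD_add_one_eq_counter, PySem.Dict.items_counter,
      ofList_map_inj addWWW addWWW_inj, List.map_map]
  rw [List.filter_congr (fun x _ => htest x), ofList_filter]
  apply List.map_congr_left
  intro x hx
  have hq : PySem.Set.contains uS x = true := (List.mem_filter.1 hx).2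
  simp only [Function.comp]
  rw [List.count_map_of_injective _ addWWW addWWW_inj, List.count_filter hq]
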